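-- pv_equiv track=rewrite | github.com/lajanki/steam-game-descriptor | app/utils.py | merge_requirements
-- ===== SOURCE A (Python) =====
-- from collections import defaultdict
--
-- def merge_requirements(source_data_list):
--     """Merge a list of requirement dicts.
--     Args:
--         source_data_list(list): list of requirements parsed from list of source description files
--     Return:
--         single dict with list of values from selected keys
--     """
--     requirements = ( [item["requirements"] for item in source_data_list if "requirements" in item] )
--
--     # Merge individual items in requirements
--     CATEGORIES_TO_EXTRACT = (
--         "OS",
--         "Processor",
--         "Memory",
--         "Graphics",
--         "DirectX",
--         "Storage",
--         "Hard Drive",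
--         "Hard Disk Space",
--         "Sound Card",
--         "Additional",
--         "Additional Notes"
--     )
--
--     extracted_requirement_map = defaultdict(list)
--     for d in requirements:
--         for key, value in d.items():
--             if key in CATEGORIES_TO_EXTRACT:
--                 extracted_requirement_map[key].extend(value)
--
--     # Merge keys denoting the same category
--     extracted_requirement_map["Storage"].extend(extracted_requirement_map.pop("Hard Drive", []))
--     extracted_requirement_map["Storage"].extend(extracted_requirement_map.pop("Hard Disk Space", []))
--     extracted_requirement_map["Additional Notes"].extend(extracted_requirement_map.pop("Additional", []))
--     return extracted_requirement_map
-- ===== SOURCE B (Python) =====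
-- def merge_requirements(source_data_list):
--     """Merge a list of requirement dicts (category-outer gather instead of
--     incremental defaultdict mutation)."""
--     requirements = [item["requirements"] for item in source_data_list if "requirements" in item]
--
--     CATEGORIES = (
--         "OS", "Processor", "Memory", "Graphics", "DirectX", "Storage",
--         "Hard Drive", "Hard Disk Space", "Sound Card", "Additional", "Additional Notes"
--     )
--     ALIASES = ("Hard Drive", "Hard Disk Space", "Additional")
--     SOURCE_KEYS = {
--         "Storage": ("Storage", "Hard Drive", "Hard Disk Space"),
--         "Additional Notes": ("Additional Notes", "Additional"),
--     }
--
--     # output categories, in order of first appearance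
--     order = []
--     for d in requirements:
--         for key in d:
--             if key in CATEGORIES and key not in ALIASES and key not in order:
--                 order.append(key)
--     if "Storage" not in order:
--         order.append("Storage")
--     if "Additional Notes" not in order:
--         order.append("Additional Notes")
--
--     # gather the values category-outer
--     merged = {}
--     for category in order:
--         values = []
--         for src in SOURCE_KEYS.get(category, (category,)):
--             for d in requirements:
--                 if src in d:
--                     values.extend(d[src])
--         merged[category] = values
--     return merged
-- ===== Notes on version B (the rewrite author's own statement) =====
-- stated objective: alternative
-- what changed: B first computes the ordered list of output categories (first-appearance dedup with alias keys folded into their canonical names), then gathers each category's values in one category-outer pass over the requirement dicts, instead of A's incremental defaultdict mutation followed by pop/extend key merging.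
import Mathlib
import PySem

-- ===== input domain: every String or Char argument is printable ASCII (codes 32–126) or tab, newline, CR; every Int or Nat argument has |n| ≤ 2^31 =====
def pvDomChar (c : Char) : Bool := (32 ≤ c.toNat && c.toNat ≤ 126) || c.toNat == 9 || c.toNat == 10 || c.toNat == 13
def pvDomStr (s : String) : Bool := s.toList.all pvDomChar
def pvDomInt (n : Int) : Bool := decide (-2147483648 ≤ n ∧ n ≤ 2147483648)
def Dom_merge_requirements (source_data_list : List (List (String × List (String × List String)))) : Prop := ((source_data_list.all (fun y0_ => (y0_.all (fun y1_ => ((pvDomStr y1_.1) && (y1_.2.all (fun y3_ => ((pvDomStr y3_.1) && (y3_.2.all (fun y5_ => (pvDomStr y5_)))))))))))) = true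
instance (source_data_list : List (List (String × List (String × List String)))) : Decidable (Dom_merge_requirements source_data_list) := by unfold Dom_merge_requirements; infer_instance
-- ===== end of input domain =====

-- B merges the dicts category-outer (key order computed first, then one gather per output
-- category) instead of A's incremental defaultdict mutation with pop/extend; objective:
-- alternative decomposition, same asymptotic cost.

-- ===== PORT A =====
-- CATEGORIES_TO_EXTRACT (shared constant of both Python versions)
def pvCats : List String :=
  ["OS", "Processor", "Memory", "Graphics", "DirectX", "Storage",
   "Hard Drive", "Hard Disk Space", "Sound Card", "Additional", "Additional Notes"]

def merge_requirements (source_data_list : List (List (String × List (String × List String)))) : List (String × List String) :=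
  -- requirements = [item["requirements"] for item in source_data_list if "requirements" in item]
  let requirements : List (List (String × List String)) :=
    (source_data_list.filter (fun item => (PySem.Dict.mk item).contains "requirements")).map
      (fun item => (PySem.Dict.mk item).getD "requirements" [])
  -- for d in requirements: for key, value in d.items(): if key in CATEGORIES: map[key].extend(value)
  let m : PySem.Dict String (List String) :=
    requirements.foldl (fun m d =>
      d.foldl (fun m kv =>
        if kv.1 ∈ pvCats then m.modify kv.1 [] (fun v => v ++ kv.2) else m) m)
      PySem.Dict.empty
  -- map["Storage"].extend(map.pop("Hard Drive", []))   (defaultdict access creates the key first)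
  let m := m.setdefault "Storage" []
  let v := m.getD "Hard Drive" []
  let m := (m.erase "Hard Drive").modify "Storage" [] (fun w => w ++ v)
  -- map["Storage"].extend(map.pop("Hard Disk Space", []))
  let v := m.getD "Hard Disk Space" []
  let m := (m.erase "Hard Disk Space").modify "Storage" [] (fun w => w ++ v)
  -- map["Additional Notes"].extend(map.pop("Additional", []))
  let m := m.setdefault "Additional Notes" []
  let v := m.getD "Additional" []
  let m := (m.erase "Additional").modify "Additional Notes" [] (fun w => w ++ v)
  m.items

-- ===== PORT B =====
def pvAliases : List String := ["Hard Drive", "Hard Disk Space", "Additional"]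

-- SOURCE_KEYS.get(category, (category,))
def pvSourceKeys (category : String) : List String :=
  if category = "Storage" then ["Storage", "Hard Drive", "Hard Disk Space"]
  else if category = "Additional Notes" then ["Additional Notes", "Additional"]
  else [category]

def merge_requirements_alt (source_data_list : List (List (String × List (String × List String)))) : List (String × List String) :=
  let requirements : List (List (String × List String)) :=
    (source_data_list.filter (fun item => (PySem.Dict.mk item).contains "requirements")).map
      (fun item => (PySem.Dict.mk item).getD "requirements" [])
  -- output categories, in order of first appearance
  let order : List String :=
    requirements.foldl (fun ord d =>
      d.foldl (fun ord kv =>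
        if kv.1 ∈ pvCats ∧ kv.1 ∉ pvAliases ∧ kv.1 ∉ ord then ord ++ [kv.1] else ord) ord) []
  let order := if "Storage" ∈ order then order else order ++ ["Storage"]
  let order := if "Additional Notes" ∈ order then order else order ++ ["Additional Notes"]
  -- gather the values category-outer
  order.map (fun category =>
    (category,
      (pvSourceKeys category).foldl (fun values src =>
        requirements.foldl (fun values d =>
          if (PySem.Dict.mk d).contains src then values ++ (PySem.Dict.mk d).getD src [] else values)
          values) []))

-- ===== PRECONDITION & SPEC =====
-- Pre_ only excludes association lists with duplicate keys, which do not encode any Python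
-- dict (duplicate keys cannot occur in a dict, so every Python input A accepts satisfies Pre_).
def Pre_merge_requirements (source_data_list : List (List (String × List (String × List String)))) : Prop :=
  ∀ item ∈ source_data_list, (item.map Prod.fst).Nodup ∧ ∀ p ∈ item, (p.2.map Prod.fst).Nodup
instance (source_data_list : List (List (String × List (String × List String)))) : Decidable (Pre_merge_requirements source_data_list) := by unfold Pre_merge_requirements; infer_instance

def pvWitness_merge_requirements : (List (List (String × List (String × List String)))) :=
  [[("requirements", [("OS", ["Windows 10"]), ("Hard Drive", ["2 GB"])])],
   [("requirements", [("Memory", ["4 GB RAM"]), ("Additional", [])])]]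

def Spec_merge_requirements (source_data_list : List (List (String × List (String × List String)))) (out : List (String × List String)) : Prop := out = merge_requirements_alt source_data_list
instance (source_data_list : List (List (String × List (String × List String)))) (out : List (String × List String)) : Decidable (Spec_merge_requirements source_data_list out) := by unfold Spec_merge_requirements; infer_instance

-- ===== CLAIM (what is proved, stated in full; the proofs are below) =====
def Claim_equal_merge_requirements : Prop := ∀ (source_data_list : List (List (String × List (String × List String)))), Dom_merge_requirements source_data_list → Pre_merge_requirements source_data_list → Spec_merge_requirements source_data_list (merge_requirements source_data_list)

-- ===== LEMMAS AND PROOFS =====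

-- proof-side abbreviations
def pvReqs (sdl : List (List (String × List (String × List String)))) : List (List (String × List String)) :=
  (sdl.filter (fun item => (PySem.Dict.mk item).contains "requirements")).map
    (fun item => (PySem.Dict.mk item).getD "requirements" [])

def pvL (sdl : List (List (String × List (String × List String)))) : List (String × List String) :=
  (pvReqs sdl).flatten.filter (fun kv => decide (kv.1 ∈ pvCats))

def pvG (sdl : List (List (String × List (String × List String)))) (c : String) : List String :=
  (((pvL sdl).filter (fun kv => kv.1 == c)).map Prod.snd).flatten

-- a "spine" dict: keys K, value function g
def pvSp (K : List String) (g : String → List String) : PySem.Dict String (List String) :=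
  PySem.Dict.mk (K.map (fun k => (k, g k)))

theorem foldl_if_skip {α β : Type} (p : α → Prop) [DecidablePred p] (f : β → α → β) (l : List α) (b : β) :
    l.foldl (fun b x => if p x then f b x else b) b = (l.filter (fun x => decide (p x))).foldl f b := by
  induction l generalizing b with
  | nil => rfl
  | cons x l ih => by_cases h : p x <;> simp [h, ih]


theorem getD_fold_extend (L : List (String × List String)) (d : PySem.Dict String (List String)) (c : String) :
    (L.foldl (fun d p => d.modify p.1 [] (fun v => v ++ p.2)) d).getD c [] =
      d.getD c [] ++ ((L.filter (fun kv => kv.1 == c)).map Prod.snd).flatten := by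
  induction L generalizing d with
  | nil => simp
  | cons p L ih =>
    simp only [List.foldl_cons, ih, List.filter_cons]
    by_cases h : p.1 = c
    · simp [h]
    · simp [h, PySem.Dict.getD_modify, Ne.symm h]


theorem sp_contains (K : List String) (g : String → List String) (c : String) :
    (pvSp K g).contains c = decide (c ∈ K) := by
  induction K with
  | nil => simp [pvSp, PySem.Dict.contains]
  | cons k K ih =>
    simp only [pvSp, PySem.Dict.contains] at ih ⊢
    by_cases h : k = c
    · simp [h]
    · have hb : (k == c) = false := by simpa using h
      have hb2 : decide (c = k) = false := by simp [Ne.symm h]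
      simp [hb, hb2, ih]

theorem sp_getD (K : List String) (g : String → List String) (c : String) :
    (pvSp K g).getD c [] = if c ∈ K then g c else [] := by
  induction K with
  | nil => simp [pvSp, PySem.Dict.getD, PySem.Dict.get?]
  | cons k K ih =>
    simp only [pvSp, PySem.Dict.getD, PySem.Dict.get?] at ih ⊢
    by_cases h : k = c
    · simp [h]
    · have hb : (k == c) = false := by simpa using h
      simp only [List.map_cons, List.find?_cons, hb]
      simp only [List.find?_map] at ih ⊢
      simpa [h, Ne.symm h] using ih

theorem sp_erase (K : List String) (g : String → List String) (c : String) :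
    (pvSp K g).erase c = pvSp (K.filter (fun k => !(k == c))) g := by
  simp only [pvSp, PySem.Dict.erase, List.filter_map]
  rfl

theorem sp_setdefault (K : List String) (g : String → List String) (c : String) (h : c ∉ K → g c = []) :
    (pvSp K g).setdefault c [] = pvSp (PySem.Set.add K c) g := by
  rw [PySem.Dict.setdefault, sp_contains, PySem.Set.add]
  by_cases hc : c ∈ K
  · simp [hc]
  · simp [hc, pvSp, h hc]

theorem sp_modify (K : List String) (g : String → List String) (c : String) (w : List String) (hc : c ∈ K) :
    (pvSp K g).modify c [] (fun v => v ++ w) = pvSp K (fun k => if k = c then (pvSp K g).getD c [] ++ w else g k) := by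
  rw [PySem.Dict.modify, PySem.Dict.insert]
  have h1 : (pvSp K g).contains c = true := by rw [sp_contains]; simpa
  rw [if_pos h1]
  simp only [pvSp, List.map_map]
  congr 1
  apply List.map_congr_left
  intro k hk
  by_cases h : k = c <;> simp [h, Function.comp]

theorem set_add_filter (p : String → Bool) (s : List String) (x : String) (h : p x = true) :
    (PySem.Set.add s x).filter p = PySem.Set.add (s.filter p) x := by
  simp only [PySem.Set.add]
  by_cases hx : x ∈ s
  · simp [hx, List.mem_filter, h]
  · have : ¬ x ∈ s.filter p := fun hc => hx (List.mem_of_mem_filter hc)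
    simp [hx, this, List.filter_append, h]

theorem set_update_filter (p : String → Bool) (l s : List String) :
    (PySem.Set.update s l).filter p = PySem.Set.update (s.filter p) (l.filter p) := by
  induction l generalizing s with
  | nil => simp [PySem.Set.update]
  | cons x l ih =>
    simp only [PySem.Set.update] at *
    rw [List.foldl_cons, ih]
    by_cases h : p x
    · rw [set_add_filter p s x h, List.filter_cons_of_pos h, List.foldl_cons]
    · have h2 : (PySem.Set.add s x).filter p = s.filter p := by
        simp only [PySem.Set.add]
        split
        · rfl
        · rw [List.filter_append]; simp [h]
      rw [h2, List.filter_cons_of_neg (by simp [h])]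

theorem set_ofList_filter (p : String → Bool) (l : List String) :
    PySem.Set.ofList (l.filter p) = (PySem.Set.ofList l).filter p := by
  have := set_update_filter p l []
  simpa [PySem.Set.update, PySem.Set.ofList] using this.symm

theorem dict_lookup_filter (d : List (String × List String)) (h : (d.map Prod.fst).Nodup) (c : String) :
    ((d.filter (fun kv => kv.1 == c)).map Prod.snd).flatten =
      (if (PySem.Dict.mk d).contains c then (PySem.Dict.mk d).getD c [] else []) := by
  induction d with
  | nil => simp [PySem.Dict.contains]
  | cons kv d ih =>
    simp only [List.map_cons, List.nodup_cons] at h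
    by_cases hc : kv.1 = c
    · have hrest : d.filter (fun kv => kv.1 == c) = [] := by
        apply List.filter_eq_nil_iff.mpr
        intro a ha hb
        exact h.1 (by rw [hc, ← show a.1 = c by simpa using hb]; exact List.mem_map_of_mem ha)
      simp [hc, hrest, PySem.Dict.contains, PySem.Dict.getD, PySem.Dict.get?]
    · have hb : (kv.1 == c) = false := by simpa using hc
      simp only [List.filter_cons, hb, Bool.false_eq_true, if_false]
      rw [ih h.2]
      have hcont : (PySem.Dict.mk (kv :: d)).contains c = (PySem.Dict.mk d).contains c := by
        simp [PySem.Dict.contains, List.any_cons, hb]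
      have hgetD : (PySem.Dict.mk (kv :: d)).getD c [] = (PySem.Dict.mk d).getD c [] := by
        simp [PySem.Dict.getD, PySem.Dict.get?, hb]
      rw [hcont, hgetD]

theorem foldl_extend_if {α : Type} (p : α → Bool) (f : α → List String) (l : List α) (acc : List String) :
    l.foldl (fun vs x => if p x then vs ++ f x else vs) acc = acc ++ ((l.filter p).map f).flatten := by
  induction l generalizing acc with
  | nil => simp
  | cons x l ih =>
    by_cases h : p x <;> simp [h, ih]

theorem flatten_map_if {α : Type} (p : α → Bool) (f : α → List String) (R : List α) :
    (R.map (fun d => if p d then f d else [])).flatten = ((R.filter p).map f).flatten := by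
  induction R with
  | nil => rfl
  | cons d R ih => by_cases h : p d <;> simp [h, ih]

theorem main_fold_eq (L : List (String × List String)) :
    L.foldl (fun m kv => m.modify kv.1 [] (fun v => v ++ kv.2)) PySem.Dict.empty =
      pvSp (PySem.Set.ofList (L.map Prod.fst))
        (fun c => ((L.filter (fun kv => kv.1 == c)).map Prod.snd).flatten) := by
  apply PySem.Dict.ext
  have hnd : (L.foldl (fun m kv => m.modify kv.1 [] (fun v => v ++ kv.2)) PySem.Dict.empty).keys.Nodup := by
    exact PySem.Dict.nodup_keys_foldl_modify_key L Prod.fst [] (fun _ kv v => v ++ kv.2) _ PySem.Dict.nodup_keys_empty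
  have hkeys : (L.foldl (fun m kv => m.modify kv.1 [] (fun v => v ++ kv.2)) PySem.Dict.empty).keys =
      PySem.Set.ofList (L.map Prod.fst) := by
    rw [PySem.Dict.keys_foldl_modify_key L Prod.fst [] (fun _ kv v => v ++ kv.2), PySem.Dict.keys_empty]
    exact PySem.Set.update_empty _
  rw [PySem.Dict.items_eq_map_keys _ hnd [], hkeys]
  show _ = (PySem.Set.ofList (L.map Prod.fst)).map _
  apply List.map_congr_left
  intro k hk
  rw [getD_fold_extend, PySem.Dict.getD_empty]
  simp


def pvK0 (sdl : List (List (String × List (String × List String)))) : List String :=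
  PySem.Set.ofList ((pvL sdl).map Prod.fst)

def pvKA (sdl : List (List (String × List (String × List String)))) : List String :=
  (PySem.Set.add ((((PySem.Set.add (pvK0 sdl) "Storage").filter (fun k => !(k == "Hard Drive"))).filter
      (fun k => !(k == "Hard Disk Space")))) "Additional Notes").filter (fun k => !(k == "Additional"))

def pvGF (sdl : List (List (String × List (String × List String)))) (k : String) : List String :=
  if k = "Additional Notes" then pvG sdl "Additional Notes" ++ pvG sdl "Additional"
  else if k = "Storage" then (pvG sdl "Storage" ++ pvG sdl "Hard Drive") ++ pvG sdl "Hard Disk Space"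
  else pvG sdl k

theorem gnil (sdl : List (List (String × List (String × List String)))) (c : String)
    (h : c ∉ pvK0 sdl) : pvG sdl c = [] := by
  rw [pvK0, PySem.Set.mem_ofList] at h
  unfold pvG
  have : (pvL sdl).filter (fun kv => kv.1 == c) = [] := by
    rw [List.filter_eq_nil_iff]
    intro kv hkv hb
    have : kv.1 = c := by simpa using hb
    exact h (this ▸ List.mem_map_of_mem hkv)
  rw [this]; rfl

theorem A_norm (sdl : List (List (String × List (String × List String)))) :
    merge_requirements sdl = (pvKA sdl).map (fun k => (k, pvGF sdl k)) := by
  have h0 : List.foldl (fun m d => d.foldl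
      (fun m kv => if kv.1 ∈ pvCats then m.modify kv.1 [] (fun v => v ++ kv.2) else m) m)
      PySem.Dict.empty
      (List.map (fun item => (PySem.Dict.mk item).getD "requirements" [])
        (List.filter (fun item => (PySem.Dict.mk item).contains "requirements") sdl))
      = pvSp (pvK0 sdl) (pvG sdl) := by
    rw [← List.foldl_flatten]
    exact (foldl_if_skip (fun kv : String × List String => kv.1 ∈ pvCats)
        (fun (m : PySem.Dict String (List String)) kv => m.modify kv.1 [] (fun v => v ++ kv.2))
        _ _).trans (main_fold_eq (pvL sdl))
  simp only [merge_requirements]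
  rw [h0]
  -- names for the successive key spines
  have hS1 : "Storage" ∈ (PySem.Set.add (pvK0 sdl) "Storage").filter (fun k => !(k == "Hard Drive")) :=
    List.mem_filter.mpr ⟨(PySem.Set.mem_add _ _ _).mpr (Or.inr rfl), by decide⟩
  have hS2 : "Storage" ∈ ((PySem.Set.add (pvK0 sdl) "Storage").filter (fun k => !(k == "Hard Drive"))).filter (fun k => !(k == "Hard Disk Space")) :=
    List.mem_filter.mpr ⟨hS1, by decide⟩
  rw [sp_setdefault _ _ _ (fun h => gnil sdl _ h)]
  rw [sp_erase]
  rw [sp_modify _ _ _ _ hS1]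
  rw [sp_erase]
  rw [sp_modify _ _ _ _ hS2]
  rw [sp_setdefault _ _ "Additional Notes" ?han]
  case han =>
    intro h
    have h0' : "Additional Notes" ∉ pvK0 sdl := by
      intro hc
      exact h (List.mem_filter.mpr ⟨List.mem_filter.mpr ⟨(PySem.Set.mem_add _ _ _).mpr (Or.inl hc), by decide⟩, by decide⟩)
    simp only [if_neg (by decide : ¬ ("Additional Notes" : String) = "Storage")]
    exact gnil sdl _ h0'
  rw [sp_erase]
  rw [sp_modify _ _ _ _ ?hanm]
  case hanm =>
    exact List.mem_filter.mpr ⟨(PySem.Set.mem_add _ _ _).mpr (Or.inr rfl), by decide⟩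
  have eS1 : (pvSp ((PySem.Set.add (pvK0 sdl) "Storage").filter (fun k => !(k == "Hard Drive"))) (pvG sdl)).getD "Storage" [] = pvG sdl "Storage" := by
    rw [sp_getD, if_pos hS1]
  have eHD : (pvSp (PySem.Set.add (pvK0 sdl) "Storage") (pvG sdl)).getD "Hard Drive" [] = pvG sdl "Hard Drive" := by
    rw [sp_getD]; split
    · rfl
    · next h => exact (gnil sdl _ (fun hc => h ((PySem.Set.mem_add _ _ _).mpr (Or.inl hc)))).symm
  simp only [eS1, eHD]
  have eS2 : (pvSp (((PySem.Set.add (pvK0 sdl) "Storage").filter (fun k => !(k == "Hard Drive"))).filter (fun k => !(k == "Hard Disk Space")))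
      (fun k => if k = "Storage" then pvG sdl "Storage" ++ pvG sdl "Hard Drive" else pvG sdl k)).getD "Storage" []
      = pvG sdl "Storage" ++ pvG sdl "Hard Drive" := by
    rw [sp_getD, if_pos hS2]; simp
  have eHDS : (pvSp ((PySem.Set.add (pvK0 sdl) "Storage").filter (fun k => !(k == "Hard Drive")))
      (fun k => if k = "Storage" then pvG sdl "Storage" ++ pvG sdl "Hard Drive" else pvG sdl k)).getD "Hard Disk Space" []
      = pvG sdl "Hard Disk Space" := by
    rw [sp_getD]; split
    · simp only [if_neg (by decide : ¬ ("Hard Disk Space" : String) = "Storage")]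
    · next h => exact (gnil sdl _ (fun hc => h (List.mem_filter.mpr ⟨(PySem.Set.mem_add _ _ _).mpr (Or.inl hc), by decide⟩))).symm
  simp only [eS2, eHDS]
  have hANKA : "Additional Notes" ∈ List.filter (fun k => !(k == "Additional"))
      (PySem.Set.add (((PySem.Set.add (pvK0 sdl) "Storage").filter (fun k => !(k == "Hard Drive"))).filter
        (fun k => !(k == "Hard Disk Space"))) "Additional Notes") :=
    List.mem_filter.mpr ⟨(PySem.Set.mem_add _ _ _).mpr (Or.inr rfl), by decide⟩
  have hitems : ∀ (K : List String) (G : String → List String), (pvSp K G).items = K.map (fun k => (k, G k)) :=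
    fun K G => rfl
  rw [hitems]
  simp only [pvKA]
  refine List.map_congr_left fun k hk => ?_
  simp only [pvGF]
  by_cases h1 : k = "Additional Notes"
  · subst h1
    simp only [sp_getD, if_pos hANKA,
      if_neg (by decide : ¬ ("Additional Notes" : String) = "Storage"),
      if_neg (by decide : ¬ ("Additional" : String) = "Storage")]
    by_cases hA : "Additional" ∈ PySem.Set.add (((PySem.Set.add (pvK0 sdl) "Storage").filter
        (fun k => !(k == "Hard Drive"))).filter (fun k => !(k == "Hard Disk Space"))) "Additional Notes"
    · rw [if_pos hA]
    · rw [if_neg hA]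
      have hz : pvG sdl "Additional" = [] := gnil sdl _ (fun hc => hA
        ((PySem.Set.mem_add _ _ _).mpr (Or.inl (List.mem_filter.mpr ⟨List.mem_filter.mpr ⟨(PySem.Set.mem_add _ _ _).mpr (Or.inl hc), by decide⟩, by decide⟩))))
      simp [hz]
  · simp only [if_neg h1]
    by_cases h2 : k = "Storage" <;> simp [h2, List.append_assoc]

theorem pre_reqs (sdl : List (List (String × List (String × List String))))
    (hpre : Pre_merge_requirements sdl) :
    ∀ d ∈ pvReqs sdl, (d.map Prod.fst).Nodup := by
  intro d hd
  rcases List.mem_map.mp hd with ⟨item, hitem, rfl⟩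
  have hitem' : item ∈ sdl := (List.mem_filter.mp hitem).1
  show ((((PySem.Dict.mk item).getD "requirements" []).map Prod.fst).Nodup)
  rw [PySem.Dict.getD_eq_get?_getD]
  unfold PySem.Dict.get?
  cases hf : List.find? (fun p => p.1 == "requirements") (PySem.Dict.mk item).items with
  | none => simp
  | some p =>
    simp only [Option.map_some, Option.getD_some]
    exact (hpre item hitem').2 p (List.mem_of_find?_eq_some hf)

theorem spine_eq (sdl : List (List (String × List (String × List String)))) :
    pvKA sdl = PySem.Set.add (PySem.Set.add (PySem.Set.ofList
      (((pvReqs sdl).flatten.filter (fun kv => decide (kv.1 ∈ pvCats ∧ kv.1 ∉ pvAliases))).map Prod.fst))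
      "Storage") "Additional Notes" := by
  unfold pvKA
  rw [set_add_filter _ _ _ (by decide)]
  rw [List.filter_filter, List.filter_filter]
  rw [set_add_filter _ _ _ (by decide)]
  unfold pvK0
  rw [← set_ofList_filter]
  congr 2
  unfold pvL
  rw [List.filter_map, List.filter_filter]
  refine congrArg PySem.Set.ofList (congrArg (List.map Prod.fst) (List.filter_congr ?_))
  intro kv _
  by_cases hA : kv.1 = "Additional" <;> by_cases hB : kv.1 = "Hard Disk Space" <;>
    by_cases hC : kv.1 = "Hard Drive" <;>
    simp [hA, hB, hC, pvAliases, Function.comp]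

theorem w_fold (sdl : List (List (String × List (String × List String))))
    (hnd : ∀ d ∈ pvReqs sdl, (d.map Prod.fst).Nodup) (src : String) (hsrc : src ∈ pvCats)
    (acc : List String) :
    (pvReqs sdl).foldl (fun values d =>
      if (PySem.Dict.mk d).contains src then values ++ (PySem.Dict.mk d).getD src [] else values) acc
      = acc ++ pvG sdl src := by
  rw [foldl_extend_if (fun d => (PySem.Dict.mk d).contains src) (fun d => (PySem.Dict.mk d).getD src [])]
  congr 1
  rw [← flatten_map_if]
  have h1 : (pvReqs sdl).map (fun d => if (PySem.Dict.mk d).contains src then (PySem.Dict.mk d).getD src [] else []) =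
      (pvReqs sdl).map (fun d => ((d.filter (fun kv => kv.1 == src)).map Prod.snd).flatten) :=
    List.map_congr_left (fun d hd => (dict_lookup_filter d (hnd d hd) src).symm)
  rw [h1]
  unfold pvG pvL
  rw [List.filter_filter]
  have h2 : ((pvReqs sdl).flatten.filter (fun kv => (kv.1 == src) && decide (kv.1 ∈ pvCats))) =
      (pvReqs sdl).flatten.filter (fun kv => kv.1 == src) := by
    apply List.filter_congr
    intro kv _
    by_cases h : kv.1 = src
    · simp [h, hsrc]
    · simp [h]
  rw [h2, List.filter_flatten, List.map_flatten, List.flatten_flatten]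
  simp only [List.map_map]
  rfl

theorem B_norm (sdl : List (List (String × List (String × List String))))
    (hnd : ∀ d ∈ pvReqs sdl, (d.map Prod.fst).Nodup) :
    merge_requirements_alt sdl = (pvKA sdl).map (fun k => (k, pvGF sdl k)) := by
  simp only [merge_requirements_alt]
  rw [show List.map (fun item => (PySem.Dict.mk item).getD "requirements" [])
      (List.filter (fun item => (PySem.Dict.mk item).contains "requirements") sdl) = pvReqs sdl from rfl]
  have hstep : (fun (ord : List String) (kv : String × List String) =>
        if kv.1 ∈ pvCats ∧ kv.1 ∉ pvAliases ∧ kv.1 ∉ ord then ord ++ [kv.1] else ord) =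
      (fun ord kv => if kv.1 ∈ pvCats ∧ kv.1 ∉ pvAliases then PySem.Set.add ord kv.1 else ord) := by
    funext ord kv
    by_cases h1 : kv.1 ∈ pvCats ∧ kv.1 ∉ pvAliases
    · by_cases h2 : kv.1 ∈ ord
      · have : ¬ (kv.1 ∈ pvCats ∧ kv.1 ∉ pvAliases ∧ kv.1 ∉ ord) := fun ⟨_, _, hc⟩ => hc h2
        simp [PySem.Set.add, h2]
      · simp [h1, h2, PySem.Set.add]
    · have : ¬ (kv.1 ∈ pvCats ∧ kv.1 ∉ pvAliases ∧ kv.1 ∉ ord) := fun ⟨ha, hb, _⟩ => h1 ⟨ha, hb⟩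
      simp [this, h1]
  rw [hstep]
  have hord : List.foldl (fun (ord : List String) d => d.foldl
      (fun ord kv => if kv.1 ∈ pvCats ∧ kv.1 ∉ pvAliases then PySem.Set.add ord kv.1 else ord) ord) []
      (pvReqs sdl) =
      PySem.Set.ofList (((pvReqs sdl).flatten.filter
        (fun kv => decide (kv.1 ∈ pvCats ∧ kv.1 ∉ pvAliases))).map Prod.fst) := by
    rw [← List.foldl_flatten]
    rw [foldl_if_skip (fun kv : String × List String => kv.1 ∈ pvCats ∧ kv.1 ∉ pvAliases)
      (fun (ord : List String) kv => PySem.Set.add ord kv.1)]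
    rw [← List.foldl_map]
    rfl
  rw [hord]
  have haddif : ∀ (s : List String) (x : String),
      (if x ∈ s then s else s ++ [x]) = PySem.Set.add s x := by
    intro s x
    by_cases h : x ∈ s <;> simp [h, PySem.Set.add]
  rw [haddif, haddif, ← spine_eq]
  refine List.map_congr_left fun k hk => ?_
  -- k ∈ pvKA: either one of the two canonical extras or a seen category key
  have hkcats : k = "Storage" ∨ k = "Additional Notes" ∨ k ∈ pvCats := by
    rw [spine_eq] at hk
    rcases (PySem.Set.mem_add _ _ _).mp hk with hk1 | hk1
    · rcases (PySem.Set.mem_add _ _ _).mp hk1 with hk2 | hk2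
      · rw [PySem.Set.mem_ofList] at hk2
        rcases List.mem_map.mp hk2 with ⟨kv, hkv, rfl⟩
        exact Or.inr (Or.inr (of_decide_eq_true (List.mem_filter.mp hkv).2).1)
      · exact Or.inl hk2
    · exact Or.inr (Or.inl hk1)
  simp only [pvGF]
  by_cases h1 : k = "Additional Notes"
  · subst h1
    rw [if_pos rfl]
    rw [show pvSourceKeys "Additional Notes" = ["Additional Notes", "Additional"] from rfl]
    simp only [List.foldl_cons, List.foldl_nil]
    rw [w_fold sdl hnd _ (by decide), w_fold sdl hnd _ (by decide)]
    simp
  · by_cases h2 : k = "Storage"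
    · subst h2
      rw [if_neg (by decide), if_pos rfl]
      rw [show pvSourceKeys "Storage" = ["Storage", "Hard Drive", "Hard Disk Space"] from rfl]
      simp only [List.foldl_cons, List.foldl_nil]
      rw [w_fold sdl hnd _ (by decide), w_fold sdl hnd _ (by decide), w_fold sdl hnd _ (by decide)]
      simp
    · have hk3 : k ∈ pvCats := by
        rcases hkcats with h | h | h
        · exact absurd h h2
        · exact absurd h h1
        · exact h
      rw [if_neg h1, if_neg h2]
      rw [show pvSourceKeys k = [k] by unfold pvSourceKeys; rw [if_neg h2, if_neg h1]]
      simp only [List.foldl_cons, List.foldl_nil]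
      rw [w_fold sdl hnd _ hk3]
      simp

-- ===== VERDICT (by name: the statement is the Claim_ definition above) =====
theorem merge_requirements_spec : Claim_equal_merge_requirements := by
  intro sdl hdom hpre
  unfold Spec_merge_requirements
  rw [A_norm, B_norm sdl (pre_reqs sdl hpre)]
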